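-- pv_equiv track=rewrite | github.com/AntoineD01/OperationResearch | functions.py | mini_col
-- ===== SOURCE A (Python) =====
-- def mini_col(table_data):
--     max_columns = min(len(table_data[0]) - 1, 13)  # Exclude the last column (Provision)
--     min_colum = []
--     for i in range(max_columns):
--         min_value = float('inf')
--         for row in table_data[:-1]:
--             if row[i] < min_value:
--                 min_value = row[i]
--         min_colum.append(min_value)
--     return min_colum
-- ===== SOURCE B (Python) =====
-- def mini_col(table_data):
--     c = min(len(table_data[0]) - 1, 13)
--     rows = table_data[:-1]
--     mins = list(rows[0][:c])
--     for row in rows[1:]: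
--         mins = [y if y < x else x for x, y in zip(mins, row)]
--     return mins
-- ===== Notes on version B (the rewrite author's own statement) =====
-- stated objective: alternative
-- what changed: Replaces A's column-major repeated scans (for each column index, rescan all rows) by a single row-major streaming pass that seeds the minima vector with the first row's prefix and updates it elementwise via zip; Pre_ excludes tables with fewer than 2 rows (where A returns float('inf') entries, not integers) and rows shorter than the column count (where A raises IndexError).
-- outside the precondition, e.g. on mini_col([[1, 2, 3]]): A returns [inf, inf], B raises IndexError
import Mathlib
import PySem

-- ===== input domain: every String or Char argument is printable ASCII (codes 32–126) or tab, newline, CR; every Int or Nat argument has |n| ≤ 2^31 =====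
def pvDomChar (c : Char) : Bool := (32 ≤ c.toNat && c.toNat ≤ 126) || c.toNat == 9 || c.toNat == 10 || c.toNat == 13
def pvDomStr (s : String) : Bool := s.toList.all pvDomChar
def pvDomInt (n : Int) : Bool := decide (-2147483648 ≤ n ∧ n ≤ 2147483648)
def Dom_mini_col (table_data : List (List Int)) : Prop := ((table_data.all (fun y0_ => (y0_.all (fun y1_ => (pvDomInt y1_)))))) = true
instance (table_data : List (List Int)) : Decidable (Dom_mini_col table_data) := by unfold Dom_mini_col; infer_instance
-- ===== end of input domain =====

-- B replaces A's column-major repeated scans by one row-major streaming pass over the rows,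
-- seeding the minima vector from the first row's prefix and updating it elementwise (objective: alternative).

-- ===== PORT A =====
-- inner loop body: 'if row[i] < min_value: min_value = row[i]'; min_value = float('inf') is `none`
def aStep (i : Int) (mv : Option Int) (row : List Int) : Option Int :=
  match PySem.List.pyGet? row i with
  | none => mv          -- row[i] raises IndexError here; excluded by Pre_
  | some x =>
    match mv with
    | none => some x    -- x < inf
    | some m => if x < m then some x else some m

def mini_col (table_data : List (List Int)) : List Int :=
  -- table_data[0] raises on an empty table (excluded by Pre_); headD stands for that access
  let max_columns : Int := min ((table_data.headD []).length - 1 : Int) 13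
  (PySem.List.pyRange 0 max_columns 1).foldl
    (fun acc i =>
      acc ++ [(table_data.dropLast.foldl (fun mv row => aStep i mv row) none).getD 0])
    []

-- ===== PORT B =====
-- '[y if y < x else x for x, y in zip(mins, row)]'
def bStep (mins row : List Int) : List Int :=
  (mins.zip row).map (fun p => if p.2 < p.1 then p.2 else p.1)

def mini_col_alt (table_data : List (List Int)) : List Int :=
  let c : Int := min ((table_data.headD []).length - 1 : Int) 13
  let rows := table_data.dropLast
  let mins := PySem.List.slice (rows.headD []) none (some c)   -- rows[0][:c]
  rows.tail.foldl bStep mins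

-- ===== PRECONDITION & SPEC =====
-- Pre_ excludes tables with fewer than 2 rows (there A returns float('inf') entries — not values of
-- the declared integer type) and tables whose non-last rows are shorter than the column count
-- (there A raises IndexError).
def Pre_mini_col (table_data : List (List Int)) : Prop :=
  2 ≤ table_data.length ∧
  ∀ row ∈ table_data.dropLast,
    min ((table_data.headD []).length - 1 : Int) 13 ≤ (row.length : Int)
instance (table_data : List (List Int)) : Decidable (Pre_mini_col table_data) := by
  unfold Pre_mini_col; infer_instance

def pvWitness_mini_col : List (List Int) := [[3, 5, 9], [1, 7, 2]]

def Spec_mini_col (table_data : List (List Int)) (out : List Int) : Prop := out = mini_col_alt table_data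
instance (table_data : List (List Int)) (out : List Int) : Decidable (Spec_mini_col table_data out) := by unfold Spec_mini_col; infer_instance

-- ===== CLAIM (what is proved, stated in full; the proofs are below) =====
def Claim_equal_mini_col : Prop := ∀ (table_data : List (List Int)), Dom_mini_col table_data → Pre_mini_col table_data → Spec_mini_col table_data (mini_col table_data)

-- ===== LEMMAS AND PROOFS =====

-- column-wise minimum step, used only to state the common value of both folds
def colStep (k : Nat) (m : Int) (s : List Int) : Int :=
  if s.getD k 0 < m then s.getD k 0 else m

theorem aStep_some (k : Nat) (m : Int) (row : List Int) (h : k < row.length) :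
    aStep (k : Int) (some m) row = some (colStep k m row) := by
  simp only [aStep, colStep, PySem.List.pyGet?_natCast, List.getElem?_eq_getElem h,
    List.getD_eq_getElem _ _ h]
  split <;> rfl

theorem aStep_none (k : Nat) (row : List Int) (h : k < row.length) :
    aStep (k : Int) none row = some (row.getD k 0) := by
  simp only [aStep, PySem.List.pyGet?_natCast, List.getElem?_eq_getElem h,
    List.getD_eq_getElem _ _ h]

theorem foldA_some (k : Nat) (rs : List (List Int)) : ∀ (m : Int), (∀ s ∈ rs, k < s.length) →
    rs.foldl (fun mv row => aStep (k : Int) mv row) (some m) = some (rs.foldl (colStep k) m) := by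
  induction rs with
  | nil => intro m _; rfl
  | cons s rs ih =>
    intro m h
    simp only [List.foldl_cons, aStep_some k m s (h s (List.mem_cons_self))]
    exact ih _ (fun t ht => h t (List.mem_cons_of_mem _ ht))

theorem bStep_length (mins row : List Int) (h : mins.length ≤ row.length) :
    (bStep mins row).length = mins.length := by
  simp [bStep, h]

theorem bStep_getD (mins row : List Int) (k : Nat) (hk : k < mins.length)
    (h : mins.length ≤ row.length) :
    (bStep mins row).getD k 0 = colStep k (mins.getD k 0) row := by
  have hb : k < (bStep mins row).length := by rw [bStep_length mins row h]; exact hk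
  rw [List.getD_eq_getElem _ _ hb, List.getD_eq_getElem _ _ hk]
  simp [bStep, colStep, List.getElem?_eq_getElem (hk.trans_le h)]

theorem foldB_eq (rs : List (List Int)) : ∀ (mins : List Int), (∀ s ∈ rs, mins.length ≤ s.length) →
    rs.foldl bStep mins
      = (List.range mins.length).map (fun k => rs.foldl (colStep k) (mins.getD k 0)) := by
  induction rs with
  | nil =>
    intro mins _
    apply List.ext_getElem (by simp)
    intro k h1 h2
    have h1' : k < mins.length := by simpa using h1
    simp [List.getD_eq_getElem?_getD, List.getElem?_eq_getElem h1']
  | cons s rs ih =>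
    intro mins h
    have hs : mins.length ≤ s.length := h s List.mem_cons_self
    have hlen : (bStep mins s).length = mins.length := bStep_length mins s hs
    rw [List.foldl_cons, ih (bStep mins s)
      (fun t ht => hlen ▸ h t (List.mem_cons_of_mem _ ht)), hlen]
    apply List.map_congr_left
    intro k hk
    have hk' : k < mins.length := List.mem_range.mp hk
    rw [bStep_getD mins s k hk' hs, List.foldl_cons]

theorem mini_col_eq (r0 r1 : List Int) (l : List (List Int))
    (hbound : ∀ row ∈ (r0 :: r1 :: l).dropLast,
      min ((r0.length : Int) - 1) 13 ≤ (row.length : Int)) :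
    mini_col (r0 :: r1 :: l) = mini_col_alt (r0 :: r1 :: l) := by
  have hdrop : (r0 :: r1 :: l).dropLast = r0 :: (r1 :: l).dropLast := List.dropLast_cons₂
  set c : Int := min ((r0.length : Int) - 1) 13 with hcdef
  set n : Nat := c.toNat with hndef
  have hc : c ≤ (r0.length : Int) - 1 := min_le_left _ _
  have hn_r0 : n ≤ r0.length := by omega
  have hrest : ∀ s ∈ (r1 :: l).dropLast, n ≤ s.length := by
    intro s hs
    have := hbound s (by rw [hdrop]; exact List.mem_cons_of_mem _ hs)
    omega
  -- B side
  have hmins : PySem.List.slice r0 none (some c) = r0.take n := by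
    by_cases h0 : 0 ≤ c
    · rw [PySem.List.slice_to r0 h0]
    · have hr0 : r0 = [] := List.eq_nil_of_length_eq_zero (by omega)
      have hc1 : c = -1 := by omega
      rw [hc1, PySem.List.slice_to_neg_one, hr0]
      simp
  have htake : (r0.take n).length = n := by simp [hn_r0]
  have hB : mini_col_alt (r0 :: r1 :: l)
      = (List.range n).map
          (fun k => (r1 :: l).dropLast.foldl (colStep k) ((r0.take n).getD k 0)) := by
    simp only [mini_col_alt, List.headD_cons, hdrop, List.tail_cons, ← hcdef, hmins]
    rw [foldB_eq _ _ (by rw [htake]; exact hrest), htake]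
  -- A side
  have hA : mini_col (r0 :: r1 :: l)
      = (List.range n).map
          (fun k => (r1 :: l).dropLast.foldl (colStep k) (r0.getD k 0)) := by
    simp only [mini_col, List.headD_cons, ← hcdef, hdrop]
    rw [PySem.List.foldl_append_singleton_eq_map, List.nil_append, PySem.List.pyRange_one]
    have : (c - 0).toNat = n := by omega
    rw [this, List.map_map]
    apply List.map_congr_left
    intro k hk
    have hk' : k < n := List.mem_range.mp hk
    have hkr0 : k < r0.length := lt_of_lt_of_le hk' hn_r0
    simp only [Function.comp_apply, zero_add]
    rw [List.foldl_cons, aStep_none k r0 hkr0,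
      foldA_some k _ _ (fun s hs => lt_of_lt_of_le hk' (hrest s hs))]
    rfl
  rw [hA, hB]
  apply List.map_congr_left
  intro k hk
  have hk' : k < n := List.mem_range.mp hk
  have h1 : (r0.take n).getD k 0 = r0.getD k 0 := by
    rw [List.getD_eq_getElem _ _ (by omega : k < (r0.take n).length),
      List.getD_eq_getElem _ _ (lt_of_lt_of_le hk' hn_r0)]
    simp
  rw [h1]

-- ===== VERDICT (by name: the statement is the Claim_ definition above) =====
theorem mini_col_spec : Claim_equal_mini_col := by
  intro td _ hpre
  obtain ⟨hlen, hbound⟩ := hpre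
  match td, hlen with
  | r0 :: r1 :: l, _ =>
    exact mini_col_eq r0 r1 l (by simpa using hbound)
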